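-- pv_equiv track=rewrite | github.com/DoubleElmo/2019-2-level-labs | lab_4/main.py | clean_tokenize_corpus
-- ===== SOURCE A (Python) =====
-- def clean_tokenize_corpus(texts_corpus: list) -> list:
--     if not texts_corpus or not isinstance(texts_corpus, list):
--         return []
--     clean_token_corpus = []
--     for one_text in texts_corpus:
--         if one_text and isinstance(one_text, str):
--             while '<br />' in one_text:
--                 one_text = one_text.replace("<br />", " ")
--             clean_token_text = []
--             words = one_text.split(" ")
--             for word in words:
--                 new_word = ""
--                 if not word.isalpha():
--                     for i in word.lower():
--                         if i.isalpha():
--                             new_word += i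
--                     if new_word:
--                         clean_token_text.append(new_word.lower())
--                 else:
--                     clean_token_text.append(word.lower())
--             clean_token_corpus += [clean_token_text]
--     return clean_token_corpus
-- ===== SOURCE B (Python) =====
-- def clean_tokenize_corpus(texts_corpus: list) -> list:
--     if not texts_corpus or not isinstance(texts_corpus, list):
--         return []
--     clean_token_corpus = []
--     for one_text in texts_corpus:
--         if one_text and isinstance(one_text, str):
--             while '<br />' in one_text:
--                 one_text = one_text.replace("<br />", " ")
--             tokens = []
--             buf = ""
--             for ch in one_text:
--                 if ch == ' ':
--                     if buf:
--                         tokens.append(buf)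
--                     buf = ""
--                 elif ch.isalpha():
--                     buf += ch.lower()
--             if buf:
--                 tokens.append(buf)
--             clean_token_corpus.append(tokens)
--     return clean_token_corpus
-- ===== Notes on version B (the rewrite author's own statement) =====
-- stated objective: alternative
-- what changed: Replaces split(" ") plus per-word alpha filtering (with a separate all-alpha fast branch and an intermediate words list) by a single character-by-character scan with a running token buffer flushed at each space; the <br /> loop and outer guards are kept.
import Mathlib
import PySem

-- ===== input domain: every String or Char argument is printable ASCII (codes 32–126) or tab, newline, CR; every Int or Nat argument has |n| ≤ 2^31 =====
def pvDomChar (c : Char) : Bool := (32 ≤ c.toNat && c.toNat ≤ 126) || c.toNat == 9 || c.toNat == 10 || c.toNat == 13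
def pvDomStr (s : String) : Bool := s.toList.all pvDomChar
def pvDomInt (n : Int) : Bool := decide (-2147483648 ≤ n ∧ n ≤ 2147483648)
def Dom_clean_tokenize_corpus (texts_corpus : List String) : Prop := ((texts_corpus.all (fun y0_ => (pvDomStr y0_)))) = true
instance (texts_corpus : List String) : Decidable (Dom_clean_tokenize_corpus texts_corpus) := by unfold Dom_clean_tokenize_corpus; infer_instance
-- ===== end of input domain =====

-- B replaces A's split(" ")-then-filter-per-word tokenization by a single character scan with a
-- running token buffer flushed at spaces (same <br /> loop and guards); objective: alternative.


-- ===== PORT A =====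
-- Shared by both ports: the identical `while '<br />' in one_text: one_text = one_text.replace("<br />", " ")`
-- line occurs verbatim in A and in B. Fuel `s.length + 1` is never exhausted: an iteration fires only
-- when an occurrence exists (so length ≥ 6) and shortens the string by at least 5 characters.
def pvBrLoop : Nat → List Char → List Char
  | 0, s => s
  | fuel + 1, s =>
    if PySem.Chars.isIn "<br />".toList s then
      pvBrLoop fuel (PySem.Chars.replace s "<br />".toList [' '])
    else s

def clean_tokenize_corpus (texts_corpus : List String) : List (List String) :=
  if texts_corpus.isEmpty then []
  else
    texts_corpus.foldl (fun clean_token_corpus one_text₀ =>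
      if one_text₀.toList.isEmpty then clean_token_corpus
      else
        let cs := pvBrLoop (one_text₀.toList.length + 1) one_text₀.toList
        let words := PySem.Chars.splitOn cs [' ']
        let clean_token_text := words.foldl (fun ctt word =>
          if !(PySem.Chars.strIsalpha word) then
            let new_word := (PySem.Chars.lower word).foldl
              (fun nw i => if PySem.Chars.isalpha i then nw ++ [i] else nw) []
            if !new_word.isEmpty then ctt ++ [String.mk (PySem.Chars.lower new_word)] else ctt
          else ctt ++ [String.mk (PySem.Chars.lower word)]) []
        clean_token_corpus ++ [clean_token_text]) []

-- ===== PORT B =====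
-- one step of B's character scan: state = (tokens so far, current token buffer)
def pvScanStep (st : List String × List Char) (ch : Char) : List String × List Char :=
  if ch = ' ' then
    ((if st.2.isEmpty then st.1 else st.1 ++ [String.mk st.2]), [])
  else if PySem.Chars.isalpha ch then (st.1, st.2 ++ [PySem.Chars.lowerChar ch])
  else st

def clean_tokenize_corpus_alt (texts_corpus : List String) : List (List String) :=
  if texts_corpus.isEmpty then []
  else
    texts_corpus.foldl (fun acc one_text₀ =>
      if one_text₀.toList.isEmpty then acc
      else
        let cs := pvBrLoop (one_text₀.toList.length + 1) one_text₀.toList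
        let st := cs.foldl pvScanStep ([], [])
        acc ++ [if st.2.isEmpty then st.1 else st.1 ++ [String.mk st.2]]) []

-- ===== PRECONDITION & SPEC =====
def Spec_clean_tokenize_corpus (texts_corpus : List String) (out : List (List String)) : Prop := out = clean_tokenize_corpus_alt texts_corpus
instance (texts_corpus : List String) (out : List (List String)) : Decidable (Spec_clean_tokenize_corpus texts_corpus out) := by unfold Spec_clean_tokenize_corpus; infer_instance

-- ===== CLAIM (what is proved, stated in full; the proofs are below) =====
def Claim_equal_clean_tokenize_corpus : Prop := ∀ (texts_corpus : List String), Dom_clean_tokenize_corpus texts_corpus → Spec_clean_tokenize_corpus texts_corpus (clean_tokenize_corpus texts_corpus)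

-- ===== LEMMAS AND PROOFS =====

-- plain structural split on a single space, the common reference point of both proofs
def pvSplit : List Char → List (List Char)
  | [] => [[]]
  | c :: cs =>
    if c = ' ' then [] :: pvSplit cs
    else match pvSplit cs with
      | [] => [[c]]          -- unreachable: pvSplit is never []
      | p :: ps => (c :: p) :: ps

-- the lowercased alpha-filter of a word, and the token (if any) it yields
def pvFlc (w : List Char) : List Char := (PySem.Chars.lower w).filter PySem.Chars.isalpha
def pvEmitL (f : List Char) : List String := if f.isEmpty then [] else [String.mk f]
def pvEmit (w : List Char) : List String := pvEmitL (pvFlc w)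

theorem pvSplit_ne_nil (cs : List Char) : pvSplit cs ≠ [] := by
  cases cs with
  | nil => simp [pvSplit]
  | cons c cs => unfold pvSplit; split_ifs with h; · simp
                 · cases pvSplit cs <;> simp

theorem upper_bounds (c : Char) (h : PySem.Chars.isupper c = true) : 65 ≤ c.toNat ∧ c.toNat ≤ 90 := by
  simp only [PySem.Chars.isupper, Bool.and_eq_true, decide_eq_true_eq, Char.le_def,
    UInt32.le_iff_toNat_le, show ∀ d : Char, d.val.toNat = d.toNat from fun _ => rfl] at h
  exact ⟨h.1, h.2⟩

theorem ofNat_toNat' (n : Nat) (h : n < 0xd800) : (Char.ofNat n).toNat = n := by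
  rw [Char.toNat_ofNat, if_pos (Or.inl h)]

theorem lowerChar_isalpha (c : Char) :
    PySem.Chars.isalpha (PySem.Chars.lowerChar c) = PySem.Chars.isalpha c := by
  unfold PySem.Chars.lowerChar
  split_ifs with h
  · obtain ⟨h1, h2⟩ := upper_bounds c h
    have hval : (Char.ofNat (c.toNat + 32)).toNat = c.toNat + 32 := ofNat_toNat' _ (by omega)
    rw [Bool.eq_iff_iff]
    simp only [PySem.Chars.isalpha, PySem.Chars.isupper, PySem.Chars.islower, Char.le_def,
      UInt32.le_iff_toNat_le, show ∀ d : Char, d.val.toNat = d.toNat from fun _ => rfl, hval,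
      Bool.or_eq_true, Bool.and_eq_true, decide_eq_true_eq,
      show ('A').toNat = 65 from rfl, show ('Z').toNat = 90 from rfl,
      show ('a').toNat = 97 from rfl, show ('z').toNat = 122 from rfl]
    omega
  · rfl

theorem lowerChar_not_upper (c : Char) :
    PySem.Chars.isupper (PySem.Chars.lowerChar c) = false := by
  unfold PySem.Chars.lowerChar
  split_ifs with h
  · obtain ⟨h1, h2⟩ := upper_bounds c h
    have hval : (Char.ofNat (c.toNat + 32)).toNat = c.toNat + 32 := ofNat_toNat' _ (by omega)
    rw [Bool.eq_false_iff]
    simp only [ne_eq, PySem.Chars.isupper, Bool.and_eq_true, decide_eq_true_eq, Char.le_def,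
      UInt32.le_iff_toNat_le, show ∀ d : Char, d.val.toNat = d.toNat from fun _ => rfl, hval,
      show ('A').toNat = 65 from rfl, show ('Z').toNat = 90 from rfl, not_and]
    omega
  · simpa using h

theorem lowerChar_idem (c : Char) :
    PySem.Chars.lowerChar (PySem.Chars.lowerChar c) = PySem.Chars.lowerChar c := by
  rw [show PySem.Chars.lowerChar (PySem.Chars.lowerChar c)
      = if PySem.Chars.isupper (PySem.Chars.lowerChar c) = true
        then Char.ofNat ((PySem.Chars.lowerChar c).toNat + 32) else PySem.Chars.lowerChar c from rfl,
    lowerChar_not_upper]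
  simp

theorem pvFlc_nil : pvFlc [] = [] := rfl

theorem pvFlc_cons_alpha (c : Char) (p : List Char) (ha : PySem.Chars.isalpha c = true) :
    pvFlc (c :: p) = PySem.Chars.lowerChar c :: pvFlc p := by
  simp [pvFlc, PySem.Chars.lower, List.filter_cons, lowerChar_isalpha, ha]

theorem pvFlc_cons_not_alpha (c : Char) (p : List Char) (ha : PySem.Chars.isalpha c = false) :
    pvFlc (c :: p) = pvFlc p := by
  simp [pvFlc, PySem.Chars.lower, List.filter_cons, lowerChar_isalpha, ha]

-- A's inner character loop builds exactly the alpha filter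
theorem newword_eq_filter (l : List Char) :
    l.foldl (fun nw i => if PySem.Chars.isalpha i then nw ++ [i] else nw) []
      = l.filter PySem.Chars.isalpha := by
  have h : ∀ (l : List Char) (acc : List Char),
      l.foldl (fun nw i => if PySem.Chars.isalpha i then nw ++ [i] else nw) acc
        = acc ++ l.filter PySem.Chars.isalpha := by
    intro l
    induction l with
    | nil => simp
    | cons c cs ih =>
      intro acc
      by_cases h : PySem.Chars.isalpha c <;> simp [List.filter_cons, h, ih]
  simpa using h l []

-- every element of pvFlc w is fixed by lowerChar
theorem lower_pvFlc (w : List Char) : PySem.Chars.lower (pvFlc w) = pvFlc w := by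
  simp only [PySem.Chars.lower]
  have : ∀ c ∈ pvFlc w, PySem.Chars.lowerChar c = c := by
    intro c hc
    have hc' : c ∈ PySem.Chars.lower w := List.mem_of_mem_filter hc
    simp only [PySem.Chars.lower, List.mem_map] at hc'
    obtain ⟨d, _, rfl⟩ := hc'
    exact lowerChar_idem d
  exact (List.map_congr_left this).trans (List.map_id _)

-- one word of A's loop appends exactly pvEmit word
theorem wordStep_eq (ctt : List String) (word : List Char) :
    (if !(PySem.Chars.strIsalpha word) then
        (let new_word := (PySem.Chars.lower word).foldl
          (fun nw i => if PySem.Chars.isalpha i then nw ++ [i] else nw) []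
        if !new_word.isEmpty then ctt ++ [String.mk (PySem.Chars.lower new_word)] else ctt)
      else ctt ++ [String.mk (PySem.Chars.lower word)])
    = ctt ++ pvEmit word := by
  simp only [newword_eq_filter]
  by_cases h : PySem.Chars.strIsalpha word = true
  · have hne : word ≠ [] := by
      intro hn; subst hn; simp [PySem.Chars.strIsalpha] at h
    have hall : ∀ c ∈ word, PySem.Chars.isalpha c = true := by
      have h2 := h
      simp only [PySem.Chars.strIsalpha, Bool.and_eq_true, List.all_eq_true] at h2
      exact fun c hc => h2.2 c hc
    have hfilter : pvFlc word = PySem.Chars.lower word := by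
      apply List.filter_eq_self.mpr
      intro c hc
      simp only [PySem.Chars.lower, List.mem_map] at hc
      obtain ⟨d, hd, rfl⟩ := hc
      rw [lowerChar_isalpha]; exact hall d hd
    have hfne : (pvFlc word).isEmpty = false := by
      rw [hfilter]
      simp [PySem.Chars.lower, List.isEmpty_eq_false_iff, List.map_eq_nil_iff, hne]
    have hlne : (PySem.Chars.lower word).isEmpty = false := by rw [← hfilter]; exact hfne
    simp only [h, Bool.not_true, Bool.false_eq_true, if_false, pvEmit, pvEmitL, hfilter, hlne]
  · have h' : PySem.Chars.strIsalpha word = false := by simpa using h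
    simp only [h', Bool.not_false, if_true, pvEmit, pvEmitL]
    rw [show (PySem.Chars.lower word).filter PySem.Chars.isalpha = pvFlc word from rfl]
    by_cases hfe : pvFlc word = []
    · simp [hfe]
    · have hf' : (pvFlc word).isEmpty = false := by simp [hfe]
      simp [hf', lower_pvFlc]

-- A's word loop = flatMap pvEmit
theorem wordFold_eq (ws : List (List Char)) (init : List String) :
    ws.foldl (fun ctt word =>
        if !(PySem.Chars.strIsalpha word) then
          (let new_word := (PySem.Chars.lower word).foldl
            (fun nw i => if PySem.Chars.isalpha i then nw ++ [i] else nw) []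
          if !new_word.isEmpty then ctt ++ [String.mk (PySem.Chars.lower new_word)] else ctt)
        else ctt ++ [String.mk (PySem.Chars.lower word)]) init
      = init ++ ws.flatMap pvEmit := by
  induction ws generalizing init with
  | nil => simp
  | cons w ws ih =>
    simp only [List.foldl_cons, List.flatMap_cons]
    rw [wordStep_eq init w, ih, List.append_assoc]

-- PySem's splitOn with a single-space separator is pvSplit
theorem splitOn_go_spec (l : List Char) :
    ∀ (fuel : Nat) (cur : List Char) (acc : List (List Char)), l.length ≤ fuel →
    PySem.Chars.splitOn.go [' '] fuel l cur acc
      = acc.reverse ++ (match pvSplit l with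
          | [] => []
          | p :: ps => (cur.reverse ++ p) :: ps) := by
  induction l with
  | nil =>
    intro fuel cur acc _
    cases fuel <;> simp [PySem.Chars.splitOn.go, pvSplit]
  | cons c cs ih =>
    intro fuel cur acc hlen
    cases fuel with
    | zero => simp at hlen
    | succ f =>
      have hlen' : cs.length ≤ f := by simpa using hlen
      by_cases hc : c = ' '
      · subst hc
        have hpref : [' '].isPrefixOf (' ' :: cs) = true := by simp [List.isPrefixOf]
        rw [PySem.Chars.splitOn.go]
        simp only [hpref, if_true, List.length_cons, List.length_nil, List.drop_succ_cons,
          List.drop_zero]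
        rw [ih f [] (cur.reverse :: acc) hlen']
        have hne := pvSplit_ne_nil cs
        cases hsp : pvSplit cs with
        | nil => exact absurd hsp hne
        | cons p ps => simp [pvSplit, hsp]
      · have hpref : [' '].isPrefixOf (c :: cs) = false := by
          simp [List.isPrefixOf, Ne.symm hc]
        rw [PySem.Chars.splitOn.go]
        simp only [hpref, Bool.false_eq_true, if_false]
        rw [ih f (c :: cur) acc hlen']
        have hne := pvSplit_ne_nil cs
        cases hsp : pvSplit cs with
        | nil => exact absurd hsp hne
        | cons p ps => simp [pvSplit, hsp, hc]

theorem splitOn_space_eq (cs : List Char) :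
    PySem.Chars.splitOn cs [' '] = pvSplit cs := by
  unfold PySem.Chars.splitOn
  rw [splitOn_go_spec cs (cs.length + 1) [] [] (by omega)]
  have hne := pvSplit_ne_nil cs
  cases hsp : pvSplit cs with
  | nil => exact absurd hsp hne
  | cons p ps => simp

-- B's scan invariant, relative to pvSplit
theorem scan_invariant (cs : List Char) :
    ∀ (tokens : List String) (buf : List Char),
    (let st := cs.foldl pvScanStep (tokens, buf)
     if st.2.isEmpty then st.1 else st.1 ++ [String.mk st.2])
      = tokens ++ (match pvSplit cs with
          | [] => []
          | p :: ps => pvEmitL (buf ++ pvFlc p) ++ ps.flatMap pvEmit) := by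
  induction cs with
  | nil =>
    intro tokens buf
    simp only [List.foldl_nil, pvSplit, pvFlc_nil, List.append_nil]
    by_cases hb : buf.isEmpty = true
    · have : buf = [] := by simpa [List.isEmpty_iff] using hb
      subst this
      simp [pvEmitL]
    · have hb' : buf.isEmpty = false := by simpa using hb
      simp [hb', pvEmitL]
  | cons c cs ih =>
    intro tokens buf
    simp only [List.foldl_cons]
    by_cases hc : c = ' '
    · subst hc
      have hstep : pvScanStep (tokens, buf) ' '
          = ((if buf.isEmpty then tokens else tokens ++ [String.mk buf]), []) := by
        simp [pvScanStep]
      rw [hstep, ih]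
      have hne := pvSplit_ne_nil cs
      cases hsp : pvSplit cs with
      | nil => exact absurd hsp hne
      | cons p ps =>
        simp only [pvSplit, hsp, if_true, List.flatMap_cons, pvFlc_nil, List.append_nil,
          List.nil_append, pvEmit]
        by_cases hb : buf.isEmpty = true
        · have : buf = [] := by simpa [List.isEmpty_iff] using hb
          subst this
          simp only [List.isEmpty_nil, if_true, pvEmitL, List.nil_append]
        · have hb' : buf.isEmpty = false := by simpa using hb
          simp only [hb', Bool.false_eq_true, if_false, pvEmitL, List.append_assoc,
            List.singleton_append]
    · by_cases ha : PySem.Chars.isalpha c = true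
      · have hstep : pvScanStep (tokens, buf) c
            = (tokens, buf ++ [PySem.Chars.lowerChar c]) := by
          simp [pvScanStep, hc, ha]
        rw [hstep, ih]
        have hne := pvSplit_ne_nil cs
        cases hsp : pvSplit cs with
        | nil => exact absurd hsp hne
        | cons p ps =>
          simp only [pvSplit, hsp, hc, if_false, pvFlc_cons_alpha c p ha, List.append_assoc,
            List.singleton_append]
      · have ha' : PySem.Chars.isalpha c = false := by simpa using ha
        have hstep : pvScanStep (tokens, buf) c = (tokens, buf) := by
          simp [pvScanStep, hc, ha']
        rw [hstep, ih]
        have hne := pvSplit_ne_nil cs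
        cases hsp : pvSplit cs with
        | nil => exact absurd hsp hne
        | cons p ps =>
          simp only [pvSplit, hsp, hc, if_false, pvFlc_cons_not_alpha c p ha']

-- per-text equality of the two tokenizations
theorem text_eq (cs : List Char) :
    (PySem.Chars.splitOn cs [' ']).foldl (fun ctt word =>
        if !(PySem.Chars.strIsalpha word) then
          (let new_word := (PySem.Chars.lower word).foldl
            (fun nw i => if PySem.Chars.isalpha i then nw ++ [i] else nw) []
          if !new_word.isEmpty then ctt ++ [String.mk (PySem.Chars.lower new_word)] else ctt)
        else ctt ++ [String.mk (PySem.Chars.lower word)]) []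
      = (let st := cs.foldl pvScanStep ([], [])
         if st.2.isEmpty then st.1 else st.1 ++ [String.mk st.2]) := by
  rw [wordFold_eq, splitOn_space_eq, scan_invariant cs [] []]
  have hne := pvSplit_ne_nil cs
  cases hsp : pvSplit cs with
  | nil => exact absurd hsp hne
  | cons p ps => simp [pvEmit]

-- ===== VERDICT (by name: the statement is the Claim_ definition above) =====
theorem clean_tokenize_corpus_spec : Claim_equal_clean_tokenize_corpus := by
  intro texts_corpus _
  unfold Spec_clean_tokenize_corpus clean_tokenize_corpus clean_tokenize_corpus_alt
  by_cases he : texts_corpus.isEmpty = true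
  · simp [he]
  · simp only [he, if_false]
    have hf : ∀ (acc : List String) (t : String),
        (fun (clean_token_corpus : List (List String)) (one_text₀ : String) =>
          if one_text₀.toList.isEmpty then clean_token_corpus
          else
            let cs := pvBrLoop (one_text₀.toList.length + 1) one_text₀.toList
            let words := PySem.Chars.splitOn cs [' ']
            let clean_token_text := words.foldl (fun ctt word =>
              if !(PySem.Chars.strIsalpha word) then
                let new_word := (PySem.Chars.lower word).foldl
                  (fun nw i => if PySem.Chars.isalpha i then nw ++ [i] else nw) []
                if !new_word.isEmpty then ctt ++ [String.mk (PySem.Chars.lower new_word)] else ctt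
              else ctt ++ [String.mk (PySem.Chars.lower word)]) []
            clean_token_corpus ++ [clean_token_text]) = (fun acc one_text₀ =>
          if one_text₀.toList.isEmpty then acc
          else
            let cs := pvBrLoop (one_text₀.toList.length + 1) one_text₀.toList
            let st := cs.foldl pvScanStep ([], [])
            acc ++ [if st.2.isEmpty then st.1 else st.1 ++ [String.mk st.2]]) := by
      intro _ _
      funext acc t
      by_cases h0 : t.toList.isEmpty = true
      · simp [h0]
      · simp only [h0, Bool.false_eq_true, if_false]
        rw [text_eq]
    rw [hf [] ""]
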